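-- pv_equiv track=rewrite | github.com/teddyy279/Python | String/Problem34 Số đẹp 3.py | is_beautiful_number
-- ===== SOURCE A (Python) =====
-- def is_beautiful_number(s):
--     increasing = True
--     decreasing = True
--     for i in range(1, len(s)):
--         if s[i] < s[i - 1]:
--             increasing = False
--         if s[i] > s[i - 1]:
--             decreasing = False
--     return increasing or decreasing
-- ===== SOURCE B (Python) =====
-- def is_beautiful_number(s):
--     lst = list(s)
--     return lst == sorted(lst) or lst == sorted(lst, reverse=True)
-- ===== Notes on version B (the rewrite author's own statement) =====
-- stated objective: idiomatic
-- what changed: B decides monotonicity by comparing the character list with its ascending and descending stable sorts instead of scanning adjacent pairs while maintaining two flags.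
import Mathlib
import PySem

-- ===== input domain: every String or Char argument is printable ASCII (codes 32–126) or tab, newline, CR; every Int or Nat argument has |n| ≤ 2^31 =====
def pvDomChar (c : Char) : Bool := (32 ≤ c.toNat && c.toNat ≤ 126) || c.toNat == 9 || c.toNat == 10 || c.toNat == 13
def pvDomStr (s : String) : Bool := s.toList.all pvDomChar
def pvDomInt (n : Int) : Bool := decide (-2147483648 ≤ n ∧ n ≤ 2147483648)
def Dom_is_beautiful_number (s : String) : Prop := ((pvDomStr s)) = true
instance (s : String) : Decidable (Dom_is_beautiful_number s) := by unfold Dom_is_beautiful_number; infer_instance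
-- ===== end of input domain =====

-- B re-implements A's adjacent-pair flag scan as a comparison with the sorted copies (idiomatic, same result).

-- ===== PORT A =====
-- A: one pass over indices 1..len(s)-1 maintaining two flags.
def is_beautiful_number (s : String) : Bool :=
  let cs := s.toList
  let st := (PySem.List.pyRange 1 (cs.length : Int) 1).foldl
    (fun (p : Bool × Bool) i =>
      (if PySem.List.pyGetD cs i ' ' < PySem.List.pyGetD cs (i-1) ' ' then false else p.1,
       if PySem.List.pyGetD cs (i-1) ' ' < PySem.List.pyGetD cs i ' ' then false else p.2))
    (true, true)
  st.1 || st.2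

-- ===== PORT B =====
-- B: list(s) == sorted(s) or list(s) == sorted(s, reverse=True)
def is_beautiful_number_alt (s : String) : Bool :=
  let lst := s.toList
  (lst == PySem.List.sorted lst (fun x => x) false) || (lst == PySem.List.sorted lst (fun x => x) true)

-- ===== PRECONDITION & SPEC =====
def Spec_is_beautiful_number (s : String) (out : Bool) : Prop := out = is_beautiful_number_alt s
instance (s : String) (out : Bool) : Decidable (Spec_is_beautiful_number s out) := by unfold Spec_is_beautiful_number; infer_instance

-- ===== CLAIM (what is proved, stated in full; the proofs are below) =====
def Claim_equal_is_beautiful_number : Prop := ∀ (s : String), Dom_is_beautiful_number s → Spec_is_beautiful_number s (is_beautiful_number s)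

-- ===== LEMMAS AND PROOFS =====

-- a "set to false when g fires" flag loop is an all-check
lemma pv_foldl_if_false (P : Int → Prop) [DecidablePred P] (l : List Int) (b : Bool) :
    l.foldl (fun b i => if P i then false else b) b = (b && l.all (fun i => !decide (P i))) := by
  induction l generalizing b with
  | nil => simp
  | cons x xs ih =>
    simp only [List.foldl_cons, List.all_cons, ih]
    by_cases h : P x <;> simp [h]

lemma pv_bool_eq_decide (b : Bool) (P : Prop) [Decidable P] (h : b = true ↔ P) :
    b = decide P := by
  by_cases hp : P <;> simp [hp] at h ⊢ <;> simp [h]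

-- the index-based all over 1..n-1 is adjacent-pair Pairwise on the list (r transitive)
lemma pv_all_iff_pairwise (cs : List Char) (r : Char → Char → Prop) [DecidableRel r]
    (htrans : ∀ {a b c : Char}, r a b → r b c → r a c)
    (f : Int → Bool)
    (hf : ∀ i : Int, 1 ≤ i → i < (cs.length : Int) →
      (f i = true ↔ r (cs.getD (i.toNat - 1) ' ') (cs.getD i.toNat ' '))) :
    ((PySem.List.pyRange 1 (cs.length : Int) 1).all f = true ↔ List.Pairwise r cs) := by
  rw [← @List.isChain_iff_pairwise _ r cs ⟨htrans⟩, List.all_eq_true, List.isChain_iff_getElem]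
  constructor
  · intro h j hj
    have hlt : ((j : Int) + 1) < (cs.length : Int) := by omega
    have hm : ((j : Int) + 1) ∈ PySem.List.pyRange 1 (cs.length : Int) 1 := by
      rw [PySem.List.mem_pyRange_one]; omega
    have hx := (hf ((j : Int) + 1) (by omega) hlt).1 (h _ hm)
    have e1 : ((j : Int) + 1).toNat - 1 = j := by omega
    have e2 : ((j : Int) + 1).toNat = j + 1 := by omega
    rw [e1, e2] at hx
    rwa [List.getD_eq_getElem cs ' ' (by omega), List.getD_eq_getElem cs ' ' (by omega)] at hx
  · intro h i hi
    rw [PySem.List.mem_pyRange_one] at hi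
    obtain ⟨h1, h2⟩ := hi
    rw [hf i h1 h2]
    have hj : (i.toNat - 1) + 1 < cs.length := by omega
    have hx := h (i.toNat - 1) hj
    have e : i.toNat - 1 + 1 = i.toNat := by omega
    simp only [e] at hx
    rwa [List.getD_eq_getElem cs ' ' (by omega), List.getD_eq_getElem cs ' ' (by omega)]

-- A computes the two Pairwise facts
lemma pv_a_char (s : String) :
    is_beautiful_number s =
      (decide (List.Pairwise (· ≤ ·) s.toList) || decide (List.Pairwise (fun a b : Char => b ≤ a) s.toList)) := by
  simp only [is_beautiful_number]
  rw [PySem.List.foldl_prod_mk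
      (f := fun b i => if PySem.List.pyGetD s.toList i ' ' < PySem.List.pyGetD s.toList (i-1) ' ' then false else b)
      (g := fun b i => if PySem.List.pyGetD s.toList (i-1) ' ' < PySem.List.pyGetD s.toList i ' ' then false else b)]
  dsimp only
  congr 1
  · apply pv_bool_eq_decide
    rw [pv_foldl_if_false, Bool.true_and]
    apply pv_all_iff_pairwise s.toList (· ≤ ·) (fun hab hbc => le_trans hab hbc)
    intro i h1 h2
    have e : (i - 1).toNat = i.toNat - 1 := by omega
    have ha : PySem.List.pyGetD s.toList i ' ' = s.toList.getD i.toNat ' ' :=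
      PySem.List.pyGetD_of_nonneg s.toList ' ' (by omega)
    have hb : PySem.List.pyGetD s.toList (i - 1) ' ' = s.toList.getD (i.toNat - 1) ' ' := by
      rw [PySem.List.pyGetD_of_nonneg s.toList ' ' (by omega), e]
    rw [ha, hb]
    simp [not_lt]
  · apply pv_bool_eq_decide
    rw [pv_foldl_if_false, Bool.true_and]
    apply pv_all_iff_pairwise s.toList (fun a b : Char => b ≤ a) (fun hab hbc => le_trans hbc hab)
    intro i h1 h2
    have e : (i - 1).toNat = i.toNat - 1 := by omega
    have ha : PySem.List.pyGetD s.toList i ' ' = s.toList.getD i.toNat ' ' :=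
      PySem.List.pyGetD_of_nonneg s.toList ' ' (by omega)
    have hb : PySem.List.pyGetD s.toList (i - 1) ' ' = s.toList.getD (i.toNat - 1) ' ' := by
      rw [PySem.List.pyGetD_of_nonneg s.toList ' ' (by omega), e]
    rw [ha, hb]
    simp [not_lt]

-- B computes the same two Pairwise facts
lemma pv_b_char (s : String) :
    is_beautiful_number_alt s =
      (decide (List.Pairwise (· ≤ ·) s.toList) || decide (List.Pairwise (fun a b : Char => b ≤ a) s.toList)) := by
  simp only [is_beautiful_number_alt]
  congr 1
  · apply pv_bool_eq_decide
    rw [beq_iff_eq]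
    constructor
    · intro h
      have := PySem.List.sorted_pairwise s.toList (fun x : Char => x)
      rwa [← h] at this
    · intro h
      exact (PySem.List.sorted_eq_self_of_pairwise s.toList (fun x : Char => x) h).symm
  · apply pv_bool_eq_decide
    rw [beq_iff_eq]
    constructor
    · intro h
      have := PySem.List.sorted_pairwise_rev s.toList (fun x : Char => x)
      rwa [← h] at this
    · intro h
      exact (PySem.List.sorted_rev_eq_self_of_pairwise s.toList (fun x : Char => x) h).symm

-- ===== VERDICT (by name: the statement is the Claim_ definition above) =====
theorem is_beautiful_number_spec : Claim_equal_is_beautiful_number := by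
  intro s _
  unfold Spec_is_beautiful_number
  rw [pv_a_char, pv_b_char]
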